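-- pv_equiv track=rewrite | github.com/mikefeneley/topcoder | src/SRM-678/the_phantom_menace.py | find
-- ===== SOURCE A (Python) =====
-- def find(doors, droids):
--     greatest_min = -1
--     best_door = doors[0]
--     for idx, door in enumerate(doors):
--         greatest_distance = 9999
--         for droid in droids:
--             distance = abs(droid - door)
--             if distance < greatest_distance:
--                 greatest_distance = distance
--
--
--
--         if greatest_distance > greatest_min:
--             greatest_min = greatest_distance
--
--     return greatest_min
-- ===== SOURCE B (Python) =====
-- def find(doors, droids):
--     # Sort the droids once, then binary-search the nearest droid for each door.
--     s = sorted(droids)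
--     n = len(s)
--     best = -1
--     for door in doors:
--         # lower bound: first index with s[lo] >= door
--         lo, hi = 0, n
--         while lo < hi:
--             mid = (lo + hi) // 2
--             if s[mid] < door:
--                 lo = mid + 1
--             else:
--                 hi = mid
--         d = 9999
--         if lo < n:
--             d = min(d, s[lo] - door)
--         if lo > 0:
--             d = min(d, door - s[lo - 1])
--         if d > best:
--             best = d
--     return best
-- ===== Notes on version B (the rewrite author's own statement) =====
-- stated objective: faster
-- what changed: B sorts the droids once and finds each door's nearest droid by binary search instead of scanning every droid for every door
import Mathlib
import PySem

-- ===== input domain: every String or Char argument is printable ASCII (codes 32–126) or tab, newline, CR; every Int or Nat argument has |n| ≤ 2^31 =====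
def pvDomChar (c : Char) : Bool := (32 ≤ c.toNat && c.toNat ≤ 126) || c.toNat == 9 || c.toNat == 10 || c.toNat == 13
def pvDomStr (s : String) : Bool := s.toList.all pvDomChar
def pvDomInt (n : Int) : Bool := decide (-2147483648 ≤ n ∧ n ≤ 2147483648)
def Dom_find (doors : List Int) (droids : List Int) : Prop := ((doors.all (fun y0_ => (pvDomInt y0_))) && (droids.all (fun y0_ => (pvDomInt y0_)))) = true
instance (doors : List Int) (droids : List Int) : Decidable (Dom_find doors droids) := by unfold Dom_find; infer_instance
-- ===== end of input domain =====

-- B replaces A's per-door scan of all droids by one sort of the droids plus a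
-- binary search for the nearest droid per door (the distance cap 9999 of A is kept).

-- ===== PORT A =====
-- A: outer loop over doors (enumerate's idx and best_door are never used),
-- inner loop scans all droids keeping the smallest distance (capped at 9999).
def find (doors : List Int) (droids : List Int) : Int :=
  match doors with
  | [] => -1  -- Python raises IndexError on doors[0] here; excluded by Pre_find
  | _ :: _ =>
    doors.foldl
      (fun greatest_min door =>
        let greatest_distance :=
          droids.foldl
            (fun gd droid =>
              let distance := |droid - door|
              if distance < gd then distance else gd)
            9999
        if greatest_distance > greatest_min then greatest_distance else greatest_min)
      (-1)

-- ===== PORT B =====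
-- hand-written lower-bound binary search from Source B: first index lo with s[lo] ≥ door
def bsearchB (s : List Int) (door : Int) (lo hi : Nat) : Nat :=
  if _h : lo < hi then
    let mid := (lo + hi) / 2
    if s.getD mid 0 < door then bsearchB s door (mid + 1) hi else bsearchB s door lo mid
  else lo
termination_by hi - lo
decreasing_by all_goals omega

def find_alt (doors : List Int) (droids : List Int) : Int :=
  let s := PySem.List.sorted droids (fun x => x) false
  doors.foldl
    (fun best door =>
      let lo := bsearchB s door 0 s.length
      let d : Int := 9999
      let d := if lo < s.length then min d (s.getD lo 0 - door) else d
      let d := if 0 < lo then min d (door - s.getD (lo - 1) 0) else d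
      if d > best then d else best)
    (-1)

-- ===== PRECONDITION & SPEC =====
-- Pre_find excludes only doors = [], where the Python A raises IndexError on doors[0].
def Pre_find (doors : List Int) (droids : List Int) : Prop := doors ≠ []
instance (doors : List Int) (droids : List Int) : Decidable (Pre_find doors droids) := by unfold Pre_find; infer_instance
def pvWitness_find : List Int × List Int := ([3, 10], [1, 7])
def Spec_find (doors : List Int) (droids : List Int) (out : Int) : Prop := out = find_alt doors droids
instance (doors : List Int) (droids : List Int) (out : Int) : Decidable (Spec_find doors droids out) := by unfold Spec_find; infer_instance

-- ===== CLAIM (what is proved, stated in full; the proofs are below) =====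
def Claim_equal_find : Prop := ∀ (doors : List Int) (droids : List Int), Dom_find doors droids → Pre_find doors droids → Spec_find doors droids (find doors droids)

-- ===== LEMMAS AND PROOFS =====

-- A's inner fold is a fold of `min` over the distances
lemma innerA_eq_foldl_min (door : Int) (l : List Int) : ∀ z : Int,
    l.foldl (fun gd droid => let d := |droid - door|; if d < gd then d else gd) z
      = l.foldl (fun gd droid => min gd |droid - door|) z := by
  induction l with
  | nil => intro z; rfl
  | cons x t ih =>
    intro z
    simp only [List.foldl_cons]
    rw [ih]
    congr 1
    simp only [min_def]
    split_ifs <;> omega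

-- min-fold is invariant under permutation
lemma foldl_min_perm (door : Int) {l₁ l₂ : List Int} (h : l₁.Perm l₂) (z : Int) :
    l₁.foldl (fun gd droid => min gd |droid - door|) z
      = l₂.foldl (fun gd droid => min gd |droid - door|) z := by
  apply List.Perm.foldl_eq' h
  intro x _ y _ z
  simp only [min_assoc, min_comm |x - door|]

lemma foldl_min_le_init (door : Int) (l : List Int) : ∀ z : Int,
    l.foldl (fun gd droid => min gd |droid - door|) z ≤ z := by
  induction l with
  | nil => intro z; simp
  | cons x t ih => intro z; exact le_trans (ih _) (min_le_left _ _)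

lemma foldl_min_le_mem (door : Int) (l : List Int) : ∀ (z x : Int), x ∈ l →
    l.foldl (fun gd droid => min gd |droid - door|) z ≤ |x - door| := by
  induction l with
  | nil => intro z x hx; simp at hx
  | cons y t ih =>
    intro z x hx
    rcases List.mem_cons.1 hx with rfl | hx
    · exact le_trans (foldl_min_le_init door t _) (min_le_right _ _)
    · exact ih _ x hx

lemma le_foldl_min (door : Int) (l : List Int) : ∀ (z m : Int), m ≤ z → (∀ x ∈ l, m ≤ |x - door|) →
    m ≤ l.foldl (fun gd droid => min gd |droid - door|) z := by
  induction l with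
  | nil => intro z m hz _; simpa
  | cons x t ih =>
    intro z m hz hl
    exact ih _ _ (le_min hz (hl x List.mem_cons_self)) (fun y hy => hl y (List.mem_cons_of_mem _ hy))

-- binary search returns the lower bound on a sorted list
lemma bsearchB_spec (s : List Int) (door : Int)
    (hs : ∀ i j : Nat, i ≤ j → j < s.length → s.getD i 0 ≤ s.getD j 0) :
    ∀ lo hi : Nat, lo ≤ hi → hi ≤ s.length →
    (∀ i, i < lo → s.getD i 0 < door) →
    (∀ i, hi ≤ i → i < s.length → door ≤ s.getD i 0) →
    lo ≤ bsearchB s door lo hi ∧ bsearchB s door lo hi ≤ hi ∧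
    (∀ i, i < bsearchB s door lo hi → s.getD i 0 < door) ∧
    (∀ i, bsearchB s door lo hi ≤ i → i < s.length → door ≤ s.getD i 0) := by
  intro lo hi
  induction hn : hi - lo using Nat.strong_induction_on generalizing lo hi with
  | _ n ih =>
  intro hlohi hhil hbelow habove
  rw [bsearchB]
  by_cases h : lo < hi
  · simp only [dif_pos h]
    set mid := (lo + hi) / 2 with hmid
    have hmlo : lo ≤ mid := by omega
    have hmhi : mid < hi := by omega
    have hmlen : mid < s.length := by omega
    by_cases hc : s.getD mid 0 < door
    · simp only [if_pos hc]
      refine (ih (hi - (mid + 1)) (by omega) (mid + 1) hi rfl (by omega) hhil ?_ habove).imp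
        (fun h1 => by omega) (fun h2 => h2)
      intro i hi'
      rcases Nat.lt_or_ge i lo with h' | h'
      · exact hbelow i h'
      · exact lt_of_le_of_lt (hs i mid (by omega) hmlen) hc
    · simp only [if_neg hc]
      refine (ih (mid - lo) (by omega) lo mid rfl hmlo (by omega) hbelow ?_).imp
        (fun h1 => h1) (fun h2 => h2.imp (fun h2' => by omega) (fun h3 => h3))
      intro i hmi hil
      exact le_trans (not_lt.1 hc) (hs mid i hmi hil)
  · simp only [dif_neg h]
    exact ⟨le_refl _, by omega, hbelow, fun i hloi hil => habove i (by omega) hil⟩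

-- the per-door value of B equals the per-door min-fold over the sorted droids
lemma perDoor_eq (s : List Int) (door : Int)
    (hs : ∀ i j : Nat, i ≤ j → j < s.length → s.getD i 0 ≤ s.getD j 0) :
    (let lo := bsearchB s door 0 s.length
     let d : Int := 9999
     let d := if lo < s.length then min d (s.getD lo 0 - door) else d
     let d := if 0 < lo then min d (door - s.getD (lo - 1) 0) else d
     d)
    = s.foldl (fun gd droid => min gd |droid - door|) 9999 := by
  obtain ⟨-, hrle, hbelow, habove⟩ :=
    bsearchB_spec s door hs 0 s.length (Nat.zero_le _) (le_refl _)
      (by omega) (fun i h1 h2 => by omega)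
  set r := bsearchB s door 0 s.length with hr
  set M := s.foldl (fun gd droid => min gd |droid - door|) 9999 with hM
  -- the two candidate distances, when they exist
  have hcand : ∀ k : Nat, k < s.length → M ≤ |s.getD k 0 - door| := by
    intro k hk
    exact foldl_min_le_mem door s 9999 _
      (by rw [List.getD_eq_getElem _ _ hk]; exact List.getElem_mem hk)
  have h9 : M ≤ (9999 : Int) := foldl_min_le_init door s 9999
  have hdle : ∀ m : Int, m ≤ 9999 → (∀ x ∈ s, m ≤ |x - door|) → m ≤ M :=
    fun m h1 h2 => le_foldl_min door s 9999 m h1 h2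
  -- distance bound for every element, by position relative to r
  have hxge : ∀ (x : Int), x ∈ s → ∀ i : Nat, (hi : i < s.length) → s.getD i 0 = x →
      (i < r → 0 < r ∧ |x - door| ≥ door - s.getD (r - 1) 0) ∧
      (r ≤ i → r < s.length ∧ |x - door| ≥ s.getD r 0 - door) := by
    intro x hx i hil hget
    constructor
    · intro h'
      have h0r : 0 < r := by omega
      refine ⟨h0r, ?_⟩
      have hlt : x < door := hget ▸ hbelow i h'
      have hr1 : s.getD i 0 ≤ s.getD (r - 1) 0 := hs i (r - 1) (by omega) (by omega)
      have habs : |x - door| = door - x := by rw [abs_of_nonpos (by omega)]; ring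
      omega
    · intro h'
      have hrl : r < s.length := by omega
      refine ⟨hrl, ?_⟩
      have hle : door ≤ x := hget ▸ habove i h' hil
      have hri : s.getD r 0 ≤ s.getD i 0 := hs r i h' hil
      have habs : |x - door| = x - door := abs_of_nonneg (by omega)
      omega
  simp only
  by_cases hA : r < s.length <;> by_cases hB : 0 < r
  · rw [if_pos hA, if_pos hB]
    apply le_antisymm
    · apply hdle
      · exact le_trans (min_le_left _ _) (min_le_left _ _)
      · intro x hx
        obtain ⟨i, hil, hxi⟩ := List.mem_iff_getElem.1 hx
        have hget : s.getD i 0 = x := by rw [List.getD_eq_getElem _ _ hil, hxi]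
        rcases Nat.lt_or_ge i r with h' | h'
        · have := ((hxge x hx i hil hget).1 h').2
          calc min (min 9999 (s.getD r 0 - door)) (door - s.getD (r - 1) 0)
              ≤ door - s.getD (r - 1) 0 := min_le_right _ _
            _ ≤ |x - door| := this
        · have := ((hxge x hx i hil hget).2 h').2
          calc min (min 9999 (s.getD r 0 - door)) (door - s.getD (r - 1) 0)
              ≤ min 9999 (s.getD r 0 - door) := min_le_left _ _
            _ ≤ s.getD r 0 - door := min_le_right _ _
            _ ≤ |x - door| := this
    · have ha : |s.getD r 0 - door| = s.getD r 0 - door :=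
        abs_of_nonneg (by have := habove r (le_refl _) hA; omega)
      have hb : |s.getD (r - 1) 0 - door| = door - s.getD (r - 1) 0 := by
        have := hbelow (r - 1) (by omega); rw [abs_of_nonpos (by omega)]; ring
      have c1 := hcand r hA; rw [ha] at c1
      have c2 := hcand (r - 1) (by omega); rw [hb] at c2
      exact le_min (le_min h9 c1) c2
  · rw [if_pos hA, if_neg hB]
    apply le_antisymm
    · apply hdle
      · exact min_le_left _ _
      · intro x hx
        obtain ⟨i, hil, hxi⟩ := List.mem_iff_getElem.1 hx
        have hget : s.getD i 0 = x := by rw [List.getD_eq_getElem _ _ hil, hxi]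
        rcases Nat.lt_or_ge i r with h' | h'
        · exact absurd ((hxge x hx i hil hget).1 h').1 hB
        · exact le_trans (min_le_right _ _) ((hxge x hx i hil hget).2 h').2
    · have ha : |s.getD r 0 - door| = s.getD r 0 - door :=
        abs_of_nonneg (by have := habove r (le_refl _) hA; omega)
      have c1 := hcand r hA; rw [ha] at c1
      exact le_min h9 c1
  · rw [if_neg hA, if_pos hB]
    apply le_antisymm
    · apply hdle
      · exact min_le_left _ _
      · intro x hx
        obtain ⟨i, hil, hxi⟩ := List.mem_iff_getElem.1 hx
        have hget : s.getD i 0 = x := by rw [List.getD_eq_getElem _ _ hil, hxi]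
        rcases Nat.lt_or_ge i r with h' | h'
        · exact le_trans (min_le_right _ _) ((hxge x hx i hil hget).1 h').2
        · exact absurd ((hxge x hx i hil hget).2 h').1 hA
    · have hb : |s.getD (r - 1) 0 - door| = door - s.getD (r - 1) 0 := by
        have := hbelow (r - 1) (by omega); rw [abs_of_nonpos (by omega)]; ring
      have c2 := hcand (r - 1) (by omega); rw [hb] at c2
      exact le_min h9 c2
  · rw [if_neg hA, if_neg hB]
    -- r = 0 and ¬ r < length : s is empty
    have hlen : s.length = 0 := by omega
    have hnil : s = [] := List.eq_nil_of_length_eq_zero hlen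
    rw [hM, hnil]
    rfl

-- sorted lists are pointwise monotone under getD
lemma sorted_getD_mono (droids : List Int) :
    ∀ i j : Nat, i ≤ j → j < (PySem.List.sorted droids (fun x => x) false).length →
      (PySem.List.sorted droids (fun x => x) false).getD i 0 ≤ (PySem.List.sorted droids (fun x => x) false).getD j 0 := by
  intro i j hij hj
  rw [List.getD_eq_getElem _ _ (by omega), List.getD_eq_getElem _ _ hj]
  exact PySem.List.sorted_id_getElem_mono droids hij hj

-- ===== VERDICT (by name: the statement is the Claim_ definition above) =====
theorem find_spec : Claim_equal_find := by
  intro doors droids _ hpre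
  unfold Spec_find find find_alt
  match doors with
  | [] => exact absurd rfl hpre
  | d0 :: dt =>
    simp only
    set s := PySem.List.sorted droids (fun x => x) false with hsdef
    have hperm : s.Perm droids := PySem.List.sorted_perm droids (fun x => x) false
    have hmono := sorted_getD_mono droids
    -- both sides are folds over the same doors list with pointwise-equal step functions
    have step : ∀ (acc : Int) (door : Int),
        (let greatest_distance :=
            droids.foldl (fun gd droid => let distance := |droid - door|; if distance < gd then distance else gd) 9999
         if greatest_distance > acc then greatest_distance else acc)
        = (let lo := bsearchB s door 0 s.length
           let d : Int := 9999
           let d := if lo < s.length then min d (s.getD lo 0 - door) else d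
           let d := if 0 < lo then min d (door - s.getD (lo - 1) 0) else d
           if d > acc then d else acc) := by
      intro acc door
      have h1 := innerA_eq_foldl_min door droids 9999
      have h2 := foldl_min_perm door hperm 9999
      have h3 := perDoor_eq s door hmono
      simp only at h1 h2 h3 ⊢
      rw [h1, ← h2, ← h3]
    -- fold congruence
    have gen : ∀ (l : List Int) (acc : Int),
        l.foldl (fun greatest_min door =>
          let greatest_distance :=
            droids.foldl (fun gd droid => let distance := |droid - door|; if distance < gd then distance else gd) 9999
          if greatest_distance > greatest_min then greatest_distance else greatest_min) acc
        = l.foldl (fun best door =>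
            let lo := bsearchB s door 0 s.length
            let d : Int := 9999
            let d := if lo < s.length then min d (s.getD lo 0 - door) else d
            let d := if 0 < lo then min d (door - s.getD (lo - 1) 0) else d
            if d > best then d else best) acc := by
      intro l
      induction l with
      | nil => intro acc; rfl
      | cons x t ih =>
        intro acc
        simp only [List.foldl_cons]
        rw [← step acc x, ih]
    exact gen (d0 :: dt) (-1)
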